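-- pv_equiv track=rewrite | github.com/Juskocode/42-Nominette-Formatter | norminette_formatter/core/formatter.py | _fix_empty_lines
-- ===== SOURCE A (Python) =====
-- from typing import List, Dict, Optional, Tuple, Set
--
-- def _fix_empty_lines(content: str) -> Tuple[str, int]:
--     """
--     Fix empty line issues in the code.
--
--     Args:
--         content: File content
--
--     Returns:
--         Tuple of (formatted_content, changes_made)
--     """
--     changes = 0
--     lines = content.split('\n')
--     result_lines = []
--     in_function = False
--     brace_count = 0
--
--     for i, line in enumerate(lines):
--         stripped = line.strip()
--
--         # Track function boundaries
--         if '{' in stripped: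
--             brace_count += stripped.count('{')
--             if brace_count > 0:
--                 in_function = True
--
--         if '}' in stripped:
--             brace_count -= stripped.count('}')
--             if brace_count <= 0:
--                 in_function = False
--                 brace_count = 0
--
--         # Remove empty lines inside functions
--         if in_function and not stripped and brace_count > 0:
--             changes += 1
--             continue
--
--         # Handle consecutive newlines (keep only one)
--         if not stripped and result_lines and not result_lines[-1].strip():
--             changes += 1
--             continue
--
--         result_lines.append(line)
--
--     # Remove empty line at end of file
--     while result_lines and not result_lines[-1].strip():
--         result_lines.pop()
--         changes += 1
--
--     return '\n'.join(result_lines), changes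
-- ===== SOURCE B (Python) =====
-- from typing import Tuple
--
--
-- def _update_braces(in_function: bool, brace_count: int, stripped: str):
--     """Track function boundaries for one stripped line (same rule as the original)."""
--     if '{' in stripped:
--         brace_count += stripped.count('{')
--         if brace_count > 0:
--             in_function = True
--     if '}' in stripped:
--         brace_count -= stripped.count('}')
--         if brace_count <= 0:
--             in_function = False
--             brace_count = 0
--     return in_function, brace_count
--
--
-- def _fix_empty_lines(content: str) -> Tuple[str, int]:
--     lines = content.split('\n')
--
--     # Pass 1: drop empty lines that fall inside a function body.
--     kept = []
--     removed_inside = 0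
--     in_function = False
--     brace_count = 0
--     for line in lines:
--         stripped = line.strip()
--         in_function, brace_count = _update_braces(in_function, brace_count, stripped)
--         if in_function and not stripped and brace_count > 0:
--             removed_inside += 1
--         else:
--             kept.append(line)
--
--     # Pass 2: collapse runs of consecutive empty lines (keep the first of each run).
--     collapsed = []
--     removed_consec = 0
--     prev_blank = False
--     for line in kept:
--         blank = not line.strip()
--         if blank and prev_blank:
--             removed_consec += 1
--         else:
--             collapsed.append(line)
--             prev_blank = blank
--
--     # Pass 3: count trailing empty lines and cut them off in one slice.
--     trailing = 0
--     for line in reversed(collapsed):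
--         if line.strip():
--             break
--         trailing += 1
--     body = collapsed[:len(collapsed) - trailing]
--
--     return '\n'.join(body), removed_inside + removed_consec + trailing
-- ===== Notes on version B (the rewrite author's own statement) =====
-- stated objective: alternative
-- what changed: Replaces A's single fused loop (which interleaves brace tracking, in-function removal and consecutive-blank collapsing against the growing output list, followed by a destructive pop-loop) with three independent sequential passes: pass 1 drops in-function blanks while tracking braces, pass 2 collapses blank runs using a prev-blank flag instead of inspecting the output list, pass 3 counts trailing blanks from the reversed list and removes them with one slice; the three counters are summed.
import Mathlib
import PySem

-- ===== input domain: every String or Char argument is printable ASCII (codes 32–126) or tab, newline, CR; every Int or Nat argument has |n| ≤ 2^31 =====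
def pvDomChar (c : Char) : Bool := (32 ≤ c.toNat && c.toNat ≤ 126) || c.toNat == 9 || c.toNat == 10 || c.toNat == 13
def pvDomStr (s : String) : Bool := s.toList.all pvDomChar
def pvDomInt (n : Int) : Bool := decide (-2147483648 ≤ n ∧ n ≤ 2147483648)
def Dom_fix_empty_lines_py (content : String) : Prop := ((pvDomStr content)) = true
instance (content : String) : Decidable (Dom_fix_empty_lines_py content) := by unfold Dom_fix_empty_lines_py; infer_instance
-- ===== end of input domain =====

-- B replaces A's single fused loop by three sequential passes (in-function blanks, consecutive blanks, trailing blanks); same O(n) cost, separable concerns.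

-- ===== PORT A =====

-- 'result_lines and not result_lines[-1].strip()' (result_lines[-1] guarded by nonemptiness)
def pvLastBlank (rs : List (List Char)) : Bool :=
  match rs.getLast? with
  | some p => (PySem.Chars.strip p).isEmpty
  | none => false

-- the brace/in_function tracking block, shared verbatim by both Pythons ('{' in s, s.count('{'), …)
def pvBrace (inf : Bool) (bc : Int) (s : List Char) : Bool × Int :=
  let p1 : Bool × Int :=
    if PySem.Chars.isIn ['{'] s then
      let b := bc + (PySem.Chars.count s ['{'] : Int)
      (if b > 0 then true else inf, b)
    else (inf, bc)
  if PySem.Chars.isIn ['}'] s then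
    let b := p1.2 - (PySem.Chars.count s ['}'] : Int)
    if b ≤ 0 then (false, 0) else (p1.1, b)
  else p1

-- one iteration of A's fused for-loop; state = (result_lines, changes, in_function, brace_count)
def pvStepA (st : List (List Char) × Int × Bool × Int) (line : List Char) :
    List (List Char) × Int × Bool × Int :=
  let s := PySem.Chars.strip line
  let fb := pvBrace st.2.2.1 st.2.2.2 s
  if fb.1 && s.isEmpty && fb.2 > 0 then (st.1, st.2.1 + 1, fb.1, fb.2)
  else if s.isEmpty && pvLastBlank st.1 then (st.1, st.2.1 + 1, fb.1, fb.2)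
  else (st.1 ++ [line], st.2.1, fb.1, fb.2)

-- 'while result_lines and not result_lines[-1].strip(): result_lines.pop(); changes += 1'
def pvTrailA (rs : List (List Char)) (ch : Int) : List (List Char) × Int :=
  if h : pvLastBlank rs then pvTrailA rs.dropLast (ch + 1) else (rs, ch)
termination_by rs.length
decreasing_by
  cases rs with
  | nil => simp [pvLastBlank] at h
  | cons a t => simp

def fix_empty_lines_py (content : String) : String × Int :=
  let lines := PySem.Chars.splitOn content.toList ['\n']
  let st := lines.foldl pvStepA ([], (0 : Int), false, (0 : Int))
  let r := pvTrailA st.1 st.2.1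
  (String.ofList (PySem.Chars.join ['\n'] r.1), r.2)

-- ===== PORT B =====

-- pass 1 step: drop blanks inside a function; state = (kept, removed_inside, in_function, brace_count)
def pvPass1 (st : List (List Char) × Int × Bool × Int) (line : List Char) :
    List (List Char) × Int × Bool × Int :=
  let s := PySem.Chars.strip line
  let fb := pvBrace st.2.2.1 st.2.2.2 s
  if fb.1 && s.isEmpty && fb.2 > 0 then (st.1, st.2.1 + 1, fb.1, fb.2)
  else (st.1 ++ [line], st.2.1, fb.1, fb.2)

-- pass 2 step: collapse runs of blanks via a prev_blank flag; state = (collapsed, removed_consec, prev_blank)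
def pvPass2 (st : List (List Char) × Int × Bool) (line : List Char) :
    List (List Char) × Int × Bool :=
  let blank := (PySem.Chars.strip line).isEmpty
  if blank && st.2.2 then (st.1, st.2.1 + 1, st.2.2)
  else (st.1 ++ [line], st.2.1, blank)

-- pass 3: 'for line in reversed(collapsed): if line.strip(): break; trailing += 1'
def pvCountTrail : List (List Char) → Nat
  | [] => 0
  | l :: t => if (PySem.Chars.strip l).isEmpty then pvCountTrail t + 1 else 0

def fix_empty_lines_py_alt (content : String) : String × Int :=
  let lines := PySem.Chars.splitOn content.toList ['\n']
  let p1 := lines.foldl pvPass1 ([], (0 : Int), false, (0 : Int))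
  let p2 := p1.1.foldl pvPass2 ([], (0 : Int), false)
  let t := pvCountTrail p2.1.reverse
  -- collapsed[:len(collapsed) - trailing]: slice with a nonnegative bound (trailing ≤ len) = List.take, exact
  (String.ofList (PySem.Chars.join ['\n'] (p2.1.take (p2.1.length - t))),
   p1.2.1 + p2.2.1 + (t : Int))

-- ===== PRECONDITION & SPEC =====
def Spec_fix_empty_lines_py (content : String) (out : String × Int) : Prop := out = fix_empty_lines_py_alt content
instance (content : String) (out : String × Int) : Decidable (Spec_fix_empty_lines_py content out) := by unfold Spec_fix_empty_lines_py; infer_instance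

-- ===== CLAIM (what is proved, stated in full; the proofs are below) =====
def Claim_equal_fix_empty_lines_py : Prop := ∀ (content : String), Dom_fix_empty_lines_py content → Spec_fix_empty_lines_py content (fix_empty_lines_py content)

-- ===== LEMMAS AND PROOFS =====

theorem pvLastBlank_concat (xs : List (List Char)) (x : List Char) :
    pvLastBlank (xs ++ [x]) = (PySem.Chars.strip x).isEmpty := by
  simp [pvLastBlank]

-- pass-2 invariant: the stored prev_blank flag is the blankness of the last kept line
theorem pvPass2_inv (ks : List (List Char)) (cs : List (List Char)) (r2 : Int) :
    (ks.foldl pvPass2 (cs, r2, pvLastBlank cs)).2.2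
      = pvLastBlank (ks.foldl pvPass2 (cs, r2, pvLastBlank cs)).1 := by
  induction ks generalizing cs r2 with
  | nil => rfl
  | cons l t ih =>
    simp only [List.foldl_cons, pvPass2]
    by_cases hb : ((PySem.Chars.strip l).isEmpty && pvLastBlank cs) = true
    · simpa [hb] using ih cs (r2 + 1)
    · simp only [hb]
      have := ih (cs ++ [l]) r2
      rw [pvLastBlank_concat] at this
      simpa using this

-- fusing A's loop = pass 1 followed by pass 2, with the two counters summed
theorem pvFuse (ls : List (List Char)) :
    ∀ (ks cs : List (List Char)) (r1 r2 : Int) (inf : Bool) (bc : Int),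
    ls.foldl pvStepA ((ks.foldl pvPass2 (cs, r2, pvLastBlank cs)).1,
                      r1 + (ks.foldl pvPass2 (cs, r2, pvLastBlank cs)).2.1, inf, bc)
      = (((ls.foldl pvPass1 (ks, r1, inf, bc)).1.foldl pvPass2 (cs, r2, pvLastBlank cs)).1,
         (ls.foldl pvPass1 (ks, r1, inf, bc)).2.1
           + ((ls.foldl pvPass1 (ks, r1, inf, bc)).1.foldl pvPass2 (cs, r2, pvLastBlank cs)).2.1,
         (ls.foldl pvPass1 (ks, r1, inf, bc)).2.2.1,
         (ls.foldl pvPass1 (ks, r1, inf, bc)).2.2.2) := by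
  induction ls with
  | nil => intro ks cs r1 r2 inf bc; rfl
  | cons l t ih =>
    intro ks cs r1 r2 inf bc
    have hpb := pvPass2_inv ks cs r2
    have hQ : (ks ++ [l]).foldl pvPass2 (cs, r2, pvLastBlank cs)
        = pvPass2 (ks.foldl pvPass2 (cs, r2, pvLastBlank cs)) l := by
      rw [List.foldl_append]; rfl
    simp only [List.foldl_cons, pvStepA, pvPass1]
    by_cases hc : ((pvBrace inf bc (PySem.Chars.strip l)).1
        && (PySem.Chars.strip l).isEmpty
        && decide ((pvBrace inf bc (PySem.Chars.strip l)).2 > 0)) = true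
    · rw [if_pos hc, if_pos hc,
        add_right_comm r1 (ks.foldl pvPass2 (cs, r2, pvLastBlank cs)).2.1 1]
      exact ih ks cs (r1 + 1) r2 _ _
    · rw [if_neg hc, if_neg hc]
      by_cases h2 : ((PySem.Chars.strip l).isEmpty
          && pvLastBlank (ks.foldl pvPass2 (cs, r2, pvLastBlank cs)).1) = true
      · rw [if_pos h2]
        have h := ih (ks ++ [l]) cs r1 r2
            (pvBrace inf bc (PySem.Chars.strip l)).1 (pvBrace inf bc (PySem.Chars.strip l)).2
        rw [hQ] at h
        simp only [pvPass2] at h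
        rw [hpb, if_pos h2, ← add_assoc] at h
        exact h
      · rw [if_neg h2]
        have h := ih (ks ++ [l]) cs r1 r2
            (pvBrace inf bc (PySem.Chars.strip l)).1 (pvBrace inf bc (PySem.Chars.strip l)).2
        rw [hQ] at h
        simp only [pvPass2] at h
        rw [hpb, if_neg h2] at h
        exact h
theorem pvTrail_eq (rs : List (List Char)) (ch : Int) :
    pvTrailA rs ch
      = (rs.take (rs.length - pvCountTrail rs.reverse),
         ch + (pvCountTrail rs.reverse : Int)) := by
  induction rs using List.reverseRecOn generalizing ch with
  | nil => rw [pvTrailA]; simp [pvLastBlank, pvCountTrail]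
  | append_singleton xs x ih =>
    rw [pvTrailA]
    rw [pvLastBlank_concat]
    by_cases hb : (PySem.Chars.strip x).isEmpty = true
    · rw [dif_pos hb]
      rw [List.dropLast_concat, ih]
      have hc : pvCountTrail (xs ++ [x]).reverse = pvCountTrail xs.reverse + 1 := by
        simp [pvCountTrail, hb]
      rw [hc]
      have hlen : (xs ++ [x]).length - (pvCountTrail xs.reverse + 1)
          = xs.length - pvCountTrail xs.reverse := by simp
      rw [hlen, List.take_append_of_le_length (Nat.sub_le _ _)]
      refine Prod.ext rfl ?_
      push_cast
      ring
    · rw [dif_neg hb]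
      have hc : pvCountTrail (xs ++ [x]).reverse = 0 := by
        simp [pvCountTrail, hb]
      rw [hc]
      simp

-- ===== VERDICT (by name: the statement is the Claim_ definition above) =====
theorem fix_empty_lines_py_spec : Claim_equal_fix_empty_lines_py := by
  intro content _
  simp only [Spec_fix_empty_lines_py, fix_empty_lines_py, fix_empty_lines_py_alt]
  have hnil : pvLastBlank [] = false := rfl
  have hF := pvFuse (PySem.Chars.splitOn content.toList ['\n']) [] [] 0 0 false 0
  simp only [List.foldl_nil, hnil, add_zero] at hF
  rw [hF, pvTrail_eq]
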